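-- pv_equiv track=rewrite | github.com/optionalg/nastools | cdotmigration/genexportpolicy.py | getpermissionsbyhost
-- ===== SOURCE A (Python) =====
-- from collections import OrderedDict
--
-- def getpermissionsbyhost(security):
--     permissions = {}
--     for element in security:
--         for host in element[1]:
--             if host not in permissions:
--                 permissions[host] = []
--             permissions[host].append(element[0])
--     return OrderedDict(sorted(permissions.items(), key=lambda t: t[0]))
-- ===== SOURCE B (Python) =====
-- from collections import OrderedDict
-- from itertools import groupby
--
-- def getpermissionsbyhost(security):
--     pairs = sorted(((h, e[0]) for e in security for h in e[1]), key=lambda p: p[0])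
--     return OrderedDict(
--         (h, [p for _, p in grp]) for h, grp in groupby(pairs, key=lambda p: p[0])
--     )
-- ===== Notes on version B (the rewrite author's own statement) =====
-- stated objective: alternative
-- what changed: Instead of incrementally building a host->permissions dict while scanning and then sorting its items, B flattens security into (host, permission) pairs, stable-sorts them by host, and groups consecutive runs with itertools.groupby.
import Mathlib
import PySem

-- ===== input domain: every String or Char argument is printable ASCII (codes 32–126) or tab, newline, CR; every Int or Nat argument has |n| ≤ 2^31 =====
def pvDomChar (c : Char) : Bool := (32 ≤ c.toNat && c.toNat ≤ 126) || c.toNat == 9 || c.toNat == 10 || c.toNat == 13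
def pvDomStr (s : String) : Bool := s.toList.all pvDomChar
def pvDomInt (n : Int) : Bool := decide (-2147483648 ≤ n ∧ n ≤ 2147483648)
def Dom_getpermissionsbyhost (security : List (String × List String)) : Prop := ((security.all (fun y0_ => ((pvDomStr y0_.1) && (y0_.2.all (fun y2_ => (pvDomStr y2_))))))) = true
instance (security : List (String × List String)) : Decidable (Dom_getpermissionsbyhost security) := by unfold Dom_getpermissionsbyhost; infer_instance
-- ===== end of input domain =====

-- B replaces A's incremental dict-building + item sort by: flatten to (host, permission) pairs, stable-sort by host, then group consecutive runs (itertools.groupby); return value only.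


-- ===== PORT A =====
def getpermissionsbyhost (security : List (String × List String)) : List (String × List String) :=
  let permissions : PySem.Dict String (List String) :=
    security.foldl (fun d element =>
      element.2.foldl (fun d host =>
        let d := if d.contains host then d else d.insert host []
        d.modify host [] (fun l => l ++ [element.1])) d) PySem.Dict.empty
  PySem.List.sorted permissions.items (fun t => t.1) false

-- ===== PORT B =====
-- itertools.groupby over (host, perm) pairs, with each group's permissions collected into a list
def pvGroup : List (String × String) → List (String × List String)
  | [] => []
  | q :: rest =>
      (q.1, q.2 :: (rest.takeWhile (fun r => r.1 == q.1)).map (fun r => r.2)) ::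
      pvGroup (rest.dropWhile (fun r => r.1 == q.1))
  termination_by l => l.length
  decreasing_by
    simp only [List.length_cons]
    exact Nat.lt_succ_of_le (List.length_dropWhile_le _ _)

def getpermissionsbyhost_alt (security : List (String × List String)) : List (String × List String) :=
  let pairs := PySem.List.sorted (security.flatMap (fun e => e.2.map (fun h => (h, e.1)))) (fun p => p.1) false
  pvGroup pairs

-- ===== PRECONDITION & SPEC =====
def Spec_getpermissionsbyhost (security : List (String × List String)) (out : List (String × List String)) : Prop := out = getpermissionsbyhost_alt security
instance (security : List (String × List String)) (out : List (String × List String)) : Decidable (Spec_getpermissionsbyhost security out) := by unfold Spec_getpermissionsbyhost; infer_instance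

-- ===== CLAIM (what is proved, stated in full; the proofs are below) =====
def Claim_equal_getpermissionsbyhost : Prop := ∀ (security : List (String × List String)), Dom_getpermissionsbyhost security → Spec_getpermissionsbyhost security (getpermissionsbyhost security)

-- ===== LEMMAS AND PROOFS =====

-- the flat (host, permission) stream A's nested loop walks through, = B's pair list before sorting
def pvPairs (security : List (String × List String)) : List (String × String) :=
  security.flatMap (fun e => e.2.map (fun h => (h, e.1)))

-- proof-side recursive presentation of first-occurrence dedup (PySem.Set.ofList)
def pvDedup : List String → List String
  | [] => []
  | x :: l => x :: (pvDedup l).filter (fun y => y ≠ x)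

-- A's ensure-key-then-append step equals a single modify-append
theorem pv_step (d : PySem.Dict String (List String)) (host v : String) :
    (let d' := if d.contains host then d else d.insert host []
     d'.modify host [] (fun l => l ++ [v])) = d.modify host [] (fun l => l ++ [v]) := by
  by_cases h : d.contains host = true
  · simp [h]
  · rw [if_neg h]
    simp [PySem.Dict.modify, PySem.Dict.getD_insert_self, PySem.Dict.insert_insert_self,
      PySem.Dict.getD_of_not_contains d [] (Bool.eq_false_iff.mpr h)]

-- A's nested loop is the flat modify-append fold over pvPairs
theorem pv_loop (security : List (String × List String)) (d : PySem.Dict String (List String)) :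
    security.foldl (fun d element =>
      element.2.foldl (fun d host =>
        let d := if d.contains host then d else d.insert host []
        d.modify host [] (fun l => l ++ [element.1])) d) d
    = (pvPairs security).foldl (fun d p => d.modify p.1 [] (fun l => l ++ [p.2])) d := by
  induction security generalizing d with
  | nil => rfl
  | cons e rest ih =>
    simp only [List.foldl_cons, pvPairs, List.flatMap_cons, List.foldl_append, List.foldl_map]
    rw [← pvPairs, ih]
    congr 1
    congr 1
    funext d' host
    exact pv_step d' host e.1

-- Set.ofList via an accumulator, against pvDedup
theorem pv_foldl_add (l : List String) (s : PySem.Set String) :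
    l.foldl PySem.Set.add s = s ++ (pvDedup l).filter (fun y => decide (y ∉ s)) := by
  induction l generalizing s with
  | nil => simp [pvDedup]
  | cons x l ih =>
    simp only [List.foldl_cons, pvDedup]
    by_cases hx : x ∈ s
    · have hadd : PySem.Set.add s x = s := by
        simp [PySem.Set.add, PySem.Set.contains, hx]
      rw [hadd, ih]
      congr 1
      rw [List.filter_cons]
      simp only [hx, not_true_eq_false, decide_false, Bool.false_eq_true,
        if_false, List.filter_filter]
      apply List.filter_congr
      intro y _
      by_cases h1 : y = x <;> by_cases h2 : y ∈ s <;> simp [h1, h2, hx]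
    · have hadd : PySem.Set.add s x = s ++ [x] := by
        simp [PySem.Set.add, PySem.Set.contains, hx]
      rw [hadd, ih]
      rw [List.filter_cons, List.filter_filter]
      have hxk : (decide (x ∉ s ++ [x])) = false := by simp
      have hpred : ∀ y, (decide (y ∉ s ++ [x])) = (decide ¬(y = x) && decide (y ∉ s)) := by
        intro y
        by_cases h1 : y = x <;> by_cases h2 : y ∈ s <;> simp [h1, h2]
      simp only [hx, not_false_eq_true, decide_true, if_true]
      rw [List.append_assoc]
      congr 1
      rw [List.singleton_append]
      have : (pvDedup l).filter (fun y => decide (y ∉ s ++ [x])) =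
          (pvDedup l).filter (fun y => decide ¬(y = x) && decide (y ∉ s)) := by
        apply List.filter_congr
        intro y _
        exact hpred y
      rw [this]
      congr 1
      apply List.filter_congr
      intro y _
      by_cases h1 : y = x <;> by_cases h2 : y ∈ s <;> simp [h1, h2]

theorem pv_ofList_eq_dedup (l : List String) : PySem.Set.ofList l = pvDedup l := by
  rw [PySem.Set.ofList_eq_foldl, pv_foldl_add]
  simp

theorem pv_dedup_sublist (l : List String) : (pvDedup l).Sublist l := by
  induction l with
  | nil => simp [pvDedup]
  | cons x l ih => exact ((List.filter_sublist.trans ih).cons₂ x)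

-- stable insertion: inserting x into a key-sorted list leaves every key class's list intact, with x at the end of its own class
theorem pv_filter_insertBy (x : String × String) (ys : List (String × String)) (h : String)
    (hys : ys.Pairwise (fun a b => a.1 ≤ b.1)) :
    (PySem.List.insertBy (fun a b => decide (a.1 < b.1)) x ys).filter (fun q => q.1 == h)
      = ys.filter (fun q => q.1 == h) ++ (if x.1 == h then [x] else []) := by
  induction ys with
  | nil =>
    show List.filter _ [x] = [] ++ _
    by_cases hx : (x.1 == h) = true <;> simp [hx]
  | cons y ys ih =>
    obtain ⟨hy, htl⟩ := List.pairwise_cons.mp hys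
    have hstep : PySem.List.insertBy (fun a b => decide (a.1 < b.1)) x (y :: ys)
        = if decide (x.1 < y.1) then x :: y :: ys
          else y :: PySem.List.insertBy (fun a b => decide (a.1 < b.1)) x ys := rfl
    rw [hstep]
    by_cases hlt : x.1 < y.1
    · rw [if_pos (by simpa using hlt)]
      by_cases hx : (x.1 == h) = true
      · have hxh : x.1 = h := by simpa using hx
        have hnil : (y :: ys).filter (fun q => q.1 == h) = [] := by
          apply List.filter_eq_nil_iff.mpr
          intro b hb
          have hge : y.1 ≤ b.1 := by
            rcases List.mem_cons.mp hb with hb' | hb'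
            · rw [hb']
            · exact hy b hb'
          simp only [beq_iff_eq]
          intro hbh
          rw [hbh, ← hxh] at hge
          exact absurd (lt_of_lt_of_le hlt hge) (lt_irrefl _)
        rw [List.filter_cons_of_pos (by simpa using hx), hnil]
        simp [hx]
      · rw [List.filter_cons_of_neg (by simpa using hx)]
        simp [hx]
    · rw [if_neg (by simpa using hlt)]
      rw [List.filter_cons, List.filter_cons, ih htl]
      split_ifs <;> simp

-- STABILITY: sorting by host preserves each host's permission order
theorem pv_filter_sorted (xs : List (String × String)) (h : String) :
    (PySem.List.sorted xs (fun p => p.1) false).filter (fun q => q.1 == h)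
      = xs.filter (fun q => q.1 == h) := by
  induction xs using List.reverseRecOn with
  | nil => rfl
  | append_singleton xs x ih =>
    have hsx : PySem.List.sorted (xs ++ [x]) (fun p => p.1) false
        = PySem.List.insertBy (fun a b => decide (a.1 < b.1)) x
            (PySem.List.sorted xs (fun p => p.1) false) := by
      rw [PySem.List.sorted_eq_foldl_insertBy, PySem.List.sorted_eq_foldl_insertBy,
        List.foldl_append]
      rfl
    rw [hsx, pv_filter_insertBy x _ h (PySem.List.sorted_pairwise xs (fun p => p.1)), ih,
      List.filter_append]
    congr 1
    by_cases hx : (x.1 == h) = true <;> simp [hx]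

-- dedup of a constant block followed by anything, after removing that constant
theorem pv_dedup_const_prefix (a : String) (tkf drf : List String) (hk : ∀ y ∈ tkf, y = a) :
    (pvDedup (tkf ++ drf)).filter (fun y => y ≠ a) = (pvDedup drf).filter (fun y => y ≠ a) := by
  induction tkf with
  | nil => rfl
  | cons z tkf ih =>
    have hz : z = a := hk z List.mem_cons_self
    simp only [List.cons_append, pvDedup, List.filter_cons]
    rw [hz]
    simp only [ne_eq, not_true_eq_false, decide_false, Bool.false_eq_true, if_false,
      List.filter_filter]
    rw [← ih (fun y hy => hk y (List.mem_cons_of_mem z hy))]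
    apply List.filter_congr
    intro y _
    by_cases hy : y = a <;> simp [hy]

theorem pv_dedup_filter_ne (a : String) (drf : List String) (hne : ∀ y ∈ drf, y ≠ a) :
    (pvDedup drf).filter (fun y => y ≠ a) = pvDedup drf := by
  apply List.filter_eq_self.mpr
  intro y hy
  simpa using hne y ((pv_dedup_sublist drf).mem hy)

-- grouping a key-sorted pair list = one entry per first-occurrence-distinct key, carrying its filter class
theorem pv_group_eq (ys : List (String × String)) (hys : ys.Pairwise (fun a b => a.1 ≤ b.1)) :
    pvGroup ys = (pvDedup (ys.map (fun p => p.1))).map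
      (fun h => (h, (ys.filter (fun q => q.1 == h)).map (fun q => q.2))) := by
  induction ys using pvGroup.induct with
  | case1 => simp [pvGroup, pvDedup]
  | case2 q rest ih =>
    obtain ⟨hq, htl⟩ := List.pairwise_cons.mp hys
    set p : String × String → Bool := fun r => r.1 == q.1 with hp
    have hsplit : rest = rest.takeWhile p ++ rest.dropWhile p := (List.takeWhile_append_dropWhile).symm
    set tk := rest.takeWhile p with htk
    set dr := rest.dropWhile p with hdr
    have hke : ∀ r ∈ tk, r.1 = q.1 := by
      intro r hr
      have := List.mem_takeWhile_imp hr
      simpa [hp] using this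
    have hdr_pw : dr.Pairwise (fun a b => a.1 ≤ b.1) :=
      List.Pairwise.sublist (List.dropWhile_sublist p) htl
    have hne : ∀ r ∈ dr, q.1 < r.1 := by
      intro r hr
      cases hcase : dr with
      | nil => rw [hcase] at hr; cases hr
      | cons d0 dr' =>
        have heq : List.dropWhile p rest = d0 :: dr' := hdr.symm.trans hcase
        have hw : List.dropWhile p rest ≠ [] := by rw [heq]; simp
        have hd0ne : p d0 = false := by
          have h5 := List.head_dropWhile_not p hw
          have h6 : (List.dropWhile p rest).head hw = d0 := by simp [heq]
          rw [h6] at h5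
          exact h5
        have hd0mem : d0 ∈ rest := (List.dropWhile_sublist p).mem (by rw [heq]; exact List.mem_cons_self)
        have hqd0 : q.1 < d0.1 := lt_of_le_of_ne (hq d0 hd0mem) (by
          intro hcontra
          rw [hp] at hd0ne
          simp only [← hcontra, beq_self_eq_true] at hd0ne
          cases hd0ne)
        rw [hcase] at hr
        rcases List.mem_cons.mp hr with hr' | hr'
        · rw [hr']; exact hqd0
        · have hpw' := hdr_pw
          rw [hcase] at hpw'
          exact lt_of_lt_of_le hqd0 ((List.pairwise_cons.mp hpw').1 r hr')
    have hgrp : pvGroup (q :: rest)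
        = (q.1, q.2 :: tk.map (fun r => r.2)) :: pvGroup dr := by
      rw [pvGroup]
    rw [hgrp, ih (List.Pairwise.sublist (List.dropWhile_sublist p) htl)]
    have hmapfst : List.map (fun r => r.1) (q :: rest)
        = q.1 :: (List.map (fun r => r.1) tk ++ List.map (fun r => r.1) dr) := by
      rw [hsplit]; simp
    rw [hmapfst]
    simp only [pvDedup]
    rw [pv_dedup_const_prefix q.1 _ _ (by
        intro y hy
        rcases List.mem_map.mp hy with ⟨r, hr, hry⟩
        rw [← hry]; exact hke r hr),
      pv_dedup_filter_ne q.1 _ (by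
        intro y hy
        rcases List.mem_map.mp hy with ⟨r, hr, hry⟩
        rw [← hry]; exact ne_of_gt (hne r hr))]
    rw [List.map_cons]
    congr 1
    · have hfq : List.filter (fun r => r.1 == q.1) (q :: rest) = q :: tk := by
        rw [hsplit, List.filter_cons_of_pos (by simp), List.filter_append,
          List.filter_eq_self.mpr (by intro r hr; simpa using hke r hr),
          List.filter_eq_nil_iff.mpr (by intro r hr; simpa using ne_of_gt (hne r hr)),
          List.append_nil]
      rw [hfq]
      simp
    · apply List.map_congr_left
      intro h hh
      have hhm : h ∈ List.map (fun r => r.1) dr := (pv_dedup_sublist _).mem hh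
      obtain ⟨r, hr, hrh⟩ := List.mem_map.mp hhm
      have hhne : q.1 ≠ h := by rw [← hrh]; exact ne_of_lt (hne r hr)
      have hfh : List.filter (fun r => r.1 == h) (q :: rest) = List.filter (fun r => r.1 == h) dr := by
        rw [hsplit, List.filter_cons_of_neg (by simp [hhne]), List.filter_append,
          List.filter_eq_nil_iff.mpr (by
            intro r' hr'
            have hk' := hke r' hr'
            simp only [hk', beq_iff_eq]
            exact fun hcc => hhne hcc),
          List.nil_append]
      rw [hfh]

-- ===== VERDICT (by name: the statement is the Claim_ definition above) =====
theorem getpermissionsbyhost_spec : Claim_equal_getpermissionsbyhost := by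
  intro security _
  show getpermissionsbyhost security = getpermissionsbyhost_alt security
  unfold getpermissionsbyhost getpermissionsbyhost_alt
  simp only []
  rw [pv_loop]
  set D := (pvPairs security).foldl (fun d p => d.modify p.1 [] (fun l => l ++ [p.2])) PySem.Dict.empty with hD
  have hnd : D.keys.Nodup := by
    rw [hD]
    exact PySem.Dict.nodup_keys_foldl_modify_key (pvPairs security) (fun r => r.1) []
      (fun _ r => fun l => l ++ [r.2]) PySem.Dict.empty (by simp)
  have hkeys : D.keys = PySem.Set.ofList ((pvPairs security).map (fun r => r.1)) := by
    rw [hD, PySem.Dict.keys_foldl_modify_key (pvPairs security) (fun r => r.1) []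
      (fun _ r => fun l => l ++ [r.2]) PySem.Dict.empty, PySem.Set.ofList_eq_foldl]
    rfl
  have hget : ∀ h, D.getD h []
      = ((pvPairs security).filter (fun r => r.1 == h)).map (fun r => r.2) := by
    intro h
    rw [hD, PySem.Dict.getD_foldl_modify_append]
    simp
  have hitems : D.items = (PySem.Set.ofList ((pvPairs security).map (fun r => r.1))).map
      (fun h => (h, ((pvPairs security).filter (fun r => r.1 == h)).map (fun r => r.2))) := by
    rw [PySem.Dict.items_eq_map_keys D hnd [], hkeys]
    exact List.map_congr_left (fun k _ => by rw [hget k])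
  change PySem.List.sorted D.items (fun t => t.1) false
      = pvGroup (PySem.List.sorted (pvPairs security) (fun r => r.1) false)
  set sp := PySem.List.sorted (pvPairs security) (fun r => r.1) false with hsp
  have hspw : sp.Pairwise (fun a b => a.1 ≤ b.1) := by
    rw [hsp]; exact PySem.List.sorted_pairwise (pvPairs security) (fun r => r.1)
  rw [pv_group_eq sp hspw]
  have hfun : (fun h => (h, (sp.filter (fun q => q.1 == h)).map (fun q => q.2)))
      = (fun h => (h, ((pvPairs security).filter (fun q => q.1 == h)).map (fun q => q.2))) := by
    funext h
    rw [hsp, pv_filter_sorted (pvPairs security) h]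
  rw [hfun, hitems]
  have hKdedup : pvDedup (sp.map (fun r => r.1)) = PySem.Set.ofList (sp.map (fun r => r.1)) :=
    (pv_ofList_eq_dedup _).symm
  apply PySem.List.sorted_eq_of_perm_of_pairwise_lt
  · apply List.Perm.map
    rw [hKdedup]
    apply (List.perm_ext_iff_of_nodup (PySem.Set.nodup_ofList _) (PySem.Set.nodup_ofList _)).mpr
    intro a
    rw [PySem.Set.mem_ofList, PySem.Set.mem_ofList]
    exact ((PySem.List.sorted_perm (pvPairs security) (fun r => r.1) false).map (fun r => r.1)).mem_iff
  · apply List.pairwise_map.mpr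
    have hle : (sp.map (fun r => r.1)).Pairwise (· ≤ ·) := by
      rw [hsp]
      exact PySem.List.sorted_map_key_pairwise (pvPairs security) (fun r => r.1)
    have hpl : (pvDedup (sp.map (fun r => r.1))).Pairwise (· ≤ ·) :=
      List.Pairwise.sublist (pv_dedup_sublist _) hle
    have hnodup : (pvDedup (sp.map (fun r => r.1))).Nodup := by
      rw [hKdedup]; exact PySem.Set.nodup_ofList _
    exact (hpl.and hnodup).imp (fun hab => lt_of_le_of_ne hab.1 hab.2)
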